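-- pv_equiv track=rewrite | github.com/isamendo17/INFERA | Valor Agregado/simulate_fabric.py | obtener_procesos_desde_estaciones
-- ===== SOURCE A (Python) =====
-- def obtener_procesos_desde_estaciones(procesos_lista, estaciones_reproceso):
--     """Obtiene la lista de procesos a partir de las estaciones especificadas para reproceso."""
--     # Encontrar la primera estación que necesita reproceso
--     primera_estacion = None
--     for est, _, _, _ in procesos_lista:
--         if est in estaciones_reproceso:
--             primera_estacion = est
--             break
--
--     if not primera_estacion:
--         return procesos_lista  # Por defecto, reprocesar todo
--
--     # Encontrar desde qué índice empezar
--     procesos_reproceso = []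
--     empezar = False
--     for proceso in procesos_lista:
--         estacion = proceso[0]
--         if estacion == primera_estacion:
--             empezar = True
--         if empezar:
--             procesos_reproceso.append(proceso)
--
--     return procesos_reproceso
-- ===== SOURCE B (Python) =====
-- def obtener_procesos_desde_estaciones(procesos_lista, estaciones_reproceso):
--     """Obtiene la lista de procesos a partir de las estaciones especificadas para reproceso."""
--     for i, (est, _, _, _) in enumerate(procesos_lista):
--         if est in estaciones_reproceso:
--             return procesos_lista[i:]
--     return procesos_lista  # Por defecto, reprocesar todo
-- ===== Notes on version B (the rewrite author's own statement) =====
-- stated objective: simpler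
-- what changed: Replaces A's two passes (find the first reprocess station, then rebuild the sublist with a 'empezar' flag) by one early-returning pass that slices the list at the first matching index.
-- intended difference: When the first station found in estaciones_reproceso is the empty string '' and it is not at index 0, A's truthy test 'if not primera_estacion' misreads it as no match and returns the whole list, while B returns the suffix from that station, the intended value. — e.g. on obtener_procesos_desde_estaciones([("A", "x", "y", "z"), ("", "x", "y", "z")], [""]): A returns [("A", "x", "y", "z"), ("", "x", "y", "z")], B returns [("", "x", "y", "z")]
import Mathlib
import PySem

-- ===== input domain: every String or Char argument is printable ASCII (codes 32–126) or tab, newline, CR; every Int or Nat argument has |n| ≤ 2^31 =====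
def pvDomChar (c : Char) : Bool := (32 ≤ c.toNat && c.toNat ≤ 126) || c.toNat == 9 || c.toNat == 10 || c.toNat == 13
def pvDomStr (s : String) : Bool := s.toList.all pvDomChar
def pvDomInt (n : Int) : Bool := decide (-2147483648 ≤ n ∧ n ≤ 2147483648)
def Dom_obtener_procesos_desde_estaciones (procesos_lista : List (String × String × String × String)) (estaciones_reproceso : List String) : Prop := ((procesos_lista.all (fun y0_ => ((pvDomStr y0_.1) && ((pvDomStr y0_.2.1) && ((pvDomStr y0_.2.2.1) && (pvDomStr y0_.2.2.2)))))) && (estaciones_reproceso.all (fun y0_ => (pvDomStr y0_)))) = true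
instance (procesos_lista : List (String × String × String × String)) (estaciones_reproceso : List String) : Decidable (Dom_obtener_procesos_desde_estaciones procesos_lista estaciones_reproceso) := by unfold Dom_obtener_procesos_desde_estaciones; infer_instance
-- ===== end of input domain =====

-- B replaces A's two passes (find first reprocess station, then rebuild with a flag) by one
-- early-returning pass that slices the list at the first matching index (objective: simpler).


-- ===== PORT A =====
-- first loop of A: the station of the first element whose station is in estaciones_reproceso
def pvAFind (procesos_lista : List (String × String × String × String)) (estaciones_reproceso : List String) : Option String :=
  match procesos_lista with
  | [] => none
  | p :: rest => if p.1 ∈ estaciones_reproceso then some p.1 else pvAFind rest estaciones_reproceso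

-- second loop of A: fold with state (empezar, procesos_reproceso)
def pvAStep (primera : String) (st : Bool × List (String × String × String × String)) (proc : String × String × String × String) : Bool × List (String × String × String × String) :=
  let empezar := st.1 || (proc.1 == primera)
  (empezar, if empezar then st.2 ++ [proc] else st.2)

def obtener_procesos_desde_estaciones (procesos_lista : List (String × String × String × String)) (estaciones_reproceso : List String) : List (String × String × String × String) :=
  match pvAFind procesos_lista estaciones_reproceso with
  | none => procesos_lista
  | some primera =>
      if primera = "" then procesos_lista  -- Python's 'if not primera_estacion' is also true for ''
      else (procesos_lista.foldl (pvAStep primera) (false, [])).2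

-- ===== PORT B =====
-- B's single loop: at the first element whose station is in estaciones_reproceso return the suffix
def pvBGo (procesos_lista : List (String × String × String × String)) (estaciones_reproceso : List String) : Option (List (String × String × String × String)) :=
  match procesos_lista with
  | [] => none
  | p :: rest => if p.1 ∈ estaciones_reproceso then some (p :: rest) else pvBGo rest estaciones_reproceso

def obtener_procesos_desde_estaciones_alt (procesos_lista : List (String × String × String × String)) (estaciones_reproceso : List String) : List (String × String × String × String) :=
  (pvBGo procesos_lista estaciones_reproceso).getD procesos_lista

-- ===== PRECONDITION & SPEC =====
-- When the first station found in estaciones_reproceso is '' and it is not at index 0, A's truthy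
-- test 'if not primera_estacion' misreads it as no match and returns the whole list, while B
-- returns the suffix from that station, the intended value.
def D_obtener_procesos_desde_estaciones (procesos_lista : List (String × String × String × String)) (estaciones_reproceso : List String) : Prop :=
  (procesos_lista.find? (fun p => decide (p.1 ∈ estaciones_reproceso))).any (fun p => p.1 == "") = true ∧
  procesos_lista.head?.any (fun h => decide (h.1 ∉ estaciones_reproceso)) = true
instance (procesos_lista : List (String × String × String × String)) (estaciones_reproceso : List String) : Decidable (D_obtener_procesos_desde_estaciones procesos_lista estaciones_reproceso) := by unfold D_obtener_procesos_desde_estaciones; infer_instance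

def Spec_obtener_procesos_desde_estaciones (procesos_lista : List (String × String × String × String)) (estaciones_reproceso : List String) (out : List (String × String × String × String)) : Prop := ¬ D_obtener_procesos_desde_estaciones procesos_lista estaciones_reproceso → out = obtener_procesos_desde_estaciones_alt procesos_lista estaciones_reproceso
instance (procesos_lista : List (String × String × String × String)) (estaciones_reproceso : List String) (out : List (String × String × String × String)) : Decidable (Spec_obtener_procesos_desde_estaciones procesos_lista estaciones_reproceso out) := by unfold Spec_obtener_procesos_desde_estaciones; infer_instance

def pvDiffWitness_obtener_procesos_desde_estaciones : (List (String × String × String × String)) × List String :=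
  ([("A", "x", "y", "z"), ("", "x", "y", "z")], [""])
def pvDiffWitnessOut_obtener_procesos_desde_estaciones : (List (String × String × String × String)) × (List (String × String × String × String)) :=
  ([("A", "x", "y", "z"), ("", "x", "y", "z")], [("", "x", "y", "z")])

-- ===== CLAIM (what is proved, stated in full; the proofs are below) =====
def Claim_unchanged_obtener_procesos_desde_estaciones : Prop := ∀ (procesos_lista : List (String × String × String × String)) (estaciones_reproceso : List String), Dom_obtener_procesos_desde_estaciones procesos_lista estaciones_reproceso → Spec_obtener_procesos_desde_estaciones procesos_lista estaciones_reproceso (obtener_procesos_desde_estaciones procesos_lista estaciones_reproceso)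
def Claim_changed_obtener_procesos_desde_estaciones : Prop := Dom_obtener_procesos_desde_estaciones (pvDiffWitness_obtener_procesos_desde_estaciones.1) (pvDiffWitness_obtener_procesos_desde_estaciones.2) ∧ D_obtener_procesos_desde_estaciones (pvDiffWitness_obtener_procesos_desde_estaciones.1) (pvDiffWitness_obtener_procesos_desde_estaciones.2) ∧ obtener_procesos_desde_estaciones (pvDiffWitness_obtener_procesos_desde_estaciones.1) (pvDiffWitness_obtener_procesos_desde_estaciones.2) = pvDiffWitnessOut_obtener_procesos_desde_estaciones.1 ∧ obtener_procesos_desde_estaciones_alt (pvDiffWitness_obtener_procesos_desde_estaciones.1) (pvDiffWitness_obtener_procesos_desde_estaciones.2) = pvDiffWitnessOut_obtener_procesos_desde_estaciones.2 ∧ pvDiffWitnessOut_obtener_procesos_desde_estaciones.1 ≠ pvDiffWitnessOut_obtener_procesos_desde_estaciones.2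
def Claim_exact_obtener_procesos_desde_estaciones : Prop := ∀ (procesos_lista : List (String × String × String × String)) (estaciones_reproceso : List String), Dom_obtener_procesos_desde_estaciones procesos_lista estaciones_reproceso → D_obtener_procesos_desde_estaciones procesos_lista estaciones_reproceso → obtener_procesos_desde_estaciones procesos_lista estaciones_reproceso ≠ obtener_procesos_desde_estaciones_alt procesos_lista estaciones_reproceso

-- ===== LEMMAS AND PROOFS =====

-- once empezar is true, A's fold appends the whole rest
lemma pvFold_true (primera : String) (xs : List (String × String × String × String)) (acc : List (String × String × String × String)) :
    (xs.foldl (pvAStep primera) (true, acc)).2 = acc ++ xs := by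
  induction xs generalizing acc with
  | nil => simp
  | cons x rest ih => simp [List.foldl, pvAStep, ih]

-- relation between A's first loop and B's loop
lemma pvAFind_BGo (xs : List (String × String × String × String)) (S : List String) :
    pvAFind xs S = ((pvBGo xs S).bind List.head?).map Prod.fst := by
  induction xs with
  | nil => rfl
  | cons x rest ih =>
    by_cases h : x.1 ∈ S <;> simp [pvAFind, pvBGo, h, ih]

lemma pvBGo_no_nil (xs : List (String × String × String × String)) (S : List String) :
    pvBGo xs S ≠ some [] := by
  induction xs with
  | nil => simp [pvBGo]
  | cons x rest ih =>
    by_cases h : x.1 ∈ S <;> simp [pvBGo, h, ih]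

lemma pvAFind_mem (xs : List (String × String × String × String)) (S : List String) (p : String)
    (h : pvAFind xs S = some p) : p ∈ S := by
  induction xs with
  | nil => simp [pvAFind] at h
  | cons x rest ih =>
    by_cases hx : x.1 ∈ S
    · simp [pvAFind, hx] at h; exact h ▸ hx
    · simp [pvAFind, hx] at h; exact ih h

-- A's second loop produces exactly B's suffix
lemma pvFold_eq_BGo (xs : List (String × String × String × String)) (S : List String) (p : String)
    (hp : p ∈ S) (h : pvAFind xs S = some p) (acc : List (String × String × String × String)) :
    (xs.foldl (pvAStep p) (false, acc)).2 = acc ++ (pvBGo xs S).getD [] := by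
  induction xs generalizing acc with
  | nil => simp [pvAFind] at h
  | cons x rest ih =>
    by_cases hx : x.1 ∈ S
    · simp [pvAFind, hx] at h
      subst h
      simp [List.foldl, pvAStep, pvBGo, hx, pvFold_true]
    · have hxp : (x.1 == p) = false := by
        simp only [beq_eq_false_iff_ne]
        exact fun e => hx (e ▸ hp)
      simp [pvAFind, hx] at h
      simp only [List.foldl, pvAStep, hxp, Bool.false_or]
      simp only [Bool.false_eq_true, if_false]
      rw [ih h acc]
      simp [pvBGo, hx]

lemma pvBGo_length (xs : List (String × String × String × String)) (S : List String)
    (ys : List (String × String × String × String)) (h : pvBGo xs S = some ys) :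
    ys.length ≤ xs.length := by
  induction xs generalizing ys with
  | nil => simp [pvBGo] at h
  | cons x rest ih =>
    by_cases hx : x.1 ∈ S
    · simp [pvBGo, hx] at h; simp [← h]
    · simp [pvBGo, hx] at h
      exact Nat.le_succ_of_le (ih _ h)

lemma pvFind?_BGo (xs : List (String × String × String × String)) (S : List String) :
    xs.find? (fun p => decide (p.1 ∈ S)) = (pvBGo xs S).bind List.head? := by
  induction xs with
  | nil => rfl
  | cons x rest ih =>
    by_cases h : x.1 ∈ S <;> simp [List.find?, pvBGo, h, ih]

-- ===== VERDICT (by name: the statement is the Claim_ definition above) =====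
theorem obtener_procesos_desde_estaciones_spec : Claim_unchanged_obtener_procesos_desde_estaciones := by
  intro xs S _ hD
  rcases hB : pvBGo xs S with _ | ys
  · have hA : pvAFind xs S = none := by rw [pvAFind_BGo, hB]; rfl
    simp only [obtener_procesos_desde_estaciones,
      obtener_procesos_desde_estaciones_alt, hA, hB, Option.getD_none]
  · cases ys with
    | nil => exact absurd hB (pvBGo_no_nil xs S)
    | cons y t =>
      have hA : pvAFind xs S = some y.1 := by rw [pvAFind_BGo, hB]; rfl
      simp only [obtener_procesos_desde_estaciones,
        obtener_procesos_desde_estaciones_alt, hA, hB, Option.getD_some]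
      by_cases hemp : y.1 = ""
      · rw [if_pos hemp]
        -- the first match has station ""; ¬D forces it to be the head of xs
        cases xs with
        | nil => simp [pvBGo] at hB
        | cons x rest =>
          by_cases hx : x.1 ∈ S
          · simp only [pvBGo, if_pos hx, Option.some.injEq] at hB
            exact hB
          · exfalso
            apply hD
            unfold D_obtener_procesos_desde_estaciones
            constructor
            · rw [pvFind?_BGo, hB]; simp [hemp]
            · simp [List.head?, hx]
      · rw [if_neg hemp]
        have := pvFold_eq_BGo xs S y.1 (pvAFind_mem xs S _ hA) hA []
        rw [this, hB]
        rfl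

theorem obtener_procesos_desde_estaciones_changed : Claim_changed_obtener_procesos_desde_estaciones := by
  unfold Claim_changed_obtener_procesos_desde_estaciones; decide

theorem obtener_procesos_desde_estaciones_tight : Claim_exact_obtener_procesos_desde_estaciones := by
  intro xs S _ hD
  obtain ⟨hfind, hhead⟩ := hD
  rw [pvFind?_BGo] at hfind
  rcases hB : pvBGo xs S with _ | ys
  · rw [hB] at hfind; simp at hfind
  · cases ys with
    | nil => exact absurd hB (pvBGo_no_nil xs S)
    | cons y t =>
      rw [hB] at hfind
      simp at hfind
      have hA : pvAFind xs S = some "" := by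
        rw [pvAFind_BGo, hB]; simp [hfind]
      have hAval : obtener_procesos_desde_estaciones xs S = xs := by
        unfold obtener_procesos_desde_estaciones
        rw [hA]; simp
      cases xs with
      | nil => simp [pvBGo] at hB
      | cons x rest =>
        simp only [List.head?, Option.any_some, decide_eq_true_eq] at hhead
        by_cases hx : x.1 ∈ S
        · exact absurd hx hhead
        · simp only [pvBGo, if_neg hx] at hB
          have hlen : (y :: t).length ≤ rest.length := pvBGo_length rest S _ hB
          have hBval : obtener_procesos_desde_estaciones_alt (x :: rest) S = y :: t := by
            unfold obtener_procesos_desde_estaciones_alt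
            simp [pvBGo, hx, hB]
          rw [hAval, hBval]
          intro he
          have hl := congrArg List.length he
          simp only [List.length_cons] at hl hlen
          omega
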